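-- pv_equiv track=rewrite | github.com/schenkel94/startup_jobs_radar | buscador_unificado.py | split_inhire_batches
-- ===== SOURCE A (Python) =====
-- INHIRE_PRIORITY_COMPANIES = [
--     "olist",
--     "contabilizei",
--     "contaazul",
--     "sympla",
--     "warren",
--     "kiwify",
--     "v4company",
--     "zig",
--     "radix",
--     "openlabs",
--     "paytrack",
--     "vitru",
-- ]
--
-- def split_inhire_batches(selected_companies: list[str], turbo_mode: bool, batch_size: int) -> list[tuple[str, list[str]]]:
--     if not selected_companies:
--         return []
--
--     selected_unique = list(dict.fromkeys(selected_companies))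
--     priority = [company for company in INHIRE_PRIORITY_COMPANIES if company in selected_unique]
--     others = [company for company in selected_unique if company not in priority]
--
--     if not turbo_mode:
--         return [("lote completo", priority + others)]
--
--     first_batch = priority[:batch_size] if batch_size > 0 else priority
--     remainder = priority[len(first_batch):] + others
--     batches: list[tuple[str, list[str]]] = []
--     if first_batch:
--         batches.append(("lote prioritario", first_batch))
--     if remainder:
--         batches.append(("lote complementar", remainder))
--     return batches or [("lote completo", selected_unique)]
-- ===== SOURCE B (Python) =====
-- INHIRE_PRIORITY_COMPANIES = [
--     "olist",
--     "contabilizei",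
--     "contaazul",
--     "sympla",
--     "warren",
--     "kiwify",
--     "v4company",
--     "zig",
--     "radix",
--     "openlabs",
--     "paytrack",
--     "vitru",
-- ]
--
-- def split_inhire_batches(selected_companies: list[str], turbo_mode: bool, batch_size: int) -> list[tuple[str, list[str]]]:
--     if not selected_companies:
--         return []
--
--     rank = {c: i for i, c in enumerate(INHIRE_PRIORITY_COMPANIES)}
--     seen = set()
--     selected_unique = []
--     priority_candidates = []
--     others = []
--     for c in selected_companies:
--         if c in seen:
--             continue
--         seen.add(c)
--         selected_unique.append(c)
--         if c in rank:
--             priority_candidates.append(c)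
--         else:
--             others.append(c)
--     priority = sorted(priority_candidates, key=rank.__getitem__)
--
--     if not turbo_mode:
--         return [("lote completo", priority + others)]
--
--     first_batch = priority[:batch_size] if batch_size > 0 else priority
--     remainder = priority[len(first_batch):] + others
--     batches = []
--     if first_batch:
--         batches.append(("lote prioritario", first_batch))
--     if remainder:
--         batches.append(("lote complementar", remainder))
--     return batches or [("lote completo", selected_unique)]
-- ===== Notes on version B (the rewrite author's own statement) =====
-- stated objective: alternative
-- what changed: A dedupes via dict.fromkeys, then scans the 12-company constant list for selected members and rescans the deduped list with a 'not in priority' list test; B builds a rank dict once, dedupes and partitions the input into priority candidates and others in a single seen-set pass, and restores the constant-list order by sorting the candidates by rank.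
import Mathlib
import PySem

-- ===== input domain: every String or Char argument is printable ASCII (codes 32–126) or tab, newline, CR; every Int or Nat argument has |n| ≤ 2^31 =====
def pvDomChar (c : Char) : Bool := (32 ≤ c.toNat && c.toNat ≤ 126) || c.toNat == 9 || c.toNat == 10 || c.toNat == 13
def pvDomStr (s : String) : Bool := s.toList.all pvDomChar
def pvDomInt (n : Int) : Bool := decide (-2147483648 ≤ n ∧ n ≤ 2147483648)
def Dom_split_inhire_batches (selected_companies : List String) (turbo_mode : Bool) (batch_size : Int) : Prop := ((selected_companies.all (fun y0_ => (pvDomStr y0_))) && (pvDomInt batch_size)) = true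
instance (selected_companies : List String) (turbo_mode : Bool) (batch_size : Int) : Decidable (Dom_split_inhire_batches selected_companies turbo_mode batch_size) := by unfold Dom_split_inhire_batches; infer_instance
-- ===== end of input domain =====

-- B replaces A's two scans over the constant priority list (a membership comprehension plus a
-- 'not in priority' list scan) by one dedup-and-partition pass over the input driven by a rank
-- dict, restoring priority order with a key-sort; same return value (objective: alternative).

-- ===== PORT A =====
def inhirePriority : List String :=
  ["olist", "contabilizei", "contaazul", "sympla", "warren", "kiwify",
   "v4company", "zig", "radix", "openlabs", "paytrack", "vitru"]

def split_inhire_batches (selected_companies : List String) (turbo_mode : Bool) (batch_size : Int) : List (String × List String) :=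
  if selected_companies = [] then []
  else
    let selected_unique := PySem.List.dedup selected_companies
    let priority := inhirePriority.filter (fun company => decide (company ∈ selected_unique))
    let others := selected_unique.filter (fun company => decide (company ∉ priority))
    if !turbo_mode then [("lote completo", priority ++ others)]
    else
      let first_batch := if batch_size > 0 then PySem.List.slice priority none (some batch_size) else priority
      let remainder := PySem.List.slice priority (some (first_batch.length : Int)) none ++ others
      let batches : List (String × List String) :=
        (if first_batch ≠ [] then [("lote prioritario", first_batch)] else []) ++
        (if remainder ≠ [] then [("lote complementar", remainder)] else [])
      if batches = [] then [("lote completo", selected_unique)] else batches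

-- ===== PORT B =====
-- rank = {c: i for i, c in enumerate(INHIRE_PRIORITY_COMPANIES)}
def inhireRank : PySem.Dict String Int :=
  (PySem.List.enumerate inhirePriority 0).foldl (fun d p => d.insert p.2 p.1) PySem.Dict.empty

def split_inhire_batches_alt (selected_companies : List String) (turbo_mode : Bool) (batch_size : Int) : List (String × List String) :=
  if selected_companies = [] then []
  else
    -- single dedup-and-partition pass: state (seen, selected_unique, priority_candidates, others)
    let st := selected_companies.foldl
      (fun (st : PySem.Set String × List String × List String × List String) c =>
        if PySem.Set.contains st.1 c then st
        else (PySem.Set.add st.1 c, st.2.1 ++ [c],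
              if (inhireRank.get? c).isSome then st.2.2.1 ++ [c] else st.2.2.1,
              if (inhireRank.get? c).isSome then st.2.2.2 else st.2.2.2 ++ [c]))
      (PySem.Set.empty, [], [], [])
    let selected_unique := st.2.1
    let others := st.2.2.2
    -- sorted(priority_candidates, key=rank.__getitem__); getD is exact here: every candidate is a key of rank
    let priority := PySem.List.sorted st.2.2.1 (fun c => inhireRank.getD c 0) false
    if !turbo_mode then [("lote completo", priority ++ others)]
    else
      let first_batch := if batch_size > 0 then PySem.List.slice priority none (some batch_size) else priority
      let remainder := PySem.List.slice priority (some (first_batch.length : Int)) none ++ others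
      let batches : List (String × List String) :=
        (if first_batch ≠ [] then [("lote prioritario", first_batch)] else []) ++
        (if remainder ≠ [] then [("lote complementar", remainder)] else [])
      if batches = [] then [("lote completo", selected_unique)] else batches

-- ===== PRECONDITION & SPEC =====
def Spec_split_inhire_batches (selected_companies : List String) (turbo_mode : Bool) (batch_size : Int) (out : List (String × List String)) : Prop := out = split_inhire_batches_alt selected_companies turbo_mode batch_size
instance (selected_companies : List String) (turbo_mode : Bool) (batch_size : Int) (out : List (String × List String)) : Decidable (Spec_split_inhire_batches selected_companies turbo_mode batch_size out) := by unfold Spec_split_inhire_batches; infer_instance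

-- ===== CLAIM (what is proved, stated in full; the proofs are below) =====
def Claim_equal_split_inhire_batches : Prop := ∀ (selected_companies : List String) (turbo_mode : Bool) (batch_size : Int), Dom_split_inhire_batches selected_companies turbo_mode batch_size → Spec_split_inhire_batches selected_companies turbo_mode batch_size (split_inhire_batches selected_companies turbo_mode batch_size)

-- ===== LEMMAS AND PROOFS =====

-- the rank dict has exactly the priority companies as keys
lemma rank_isSome (c : String) : (inhireRank.get? c).isSome = decide (c ∈ inhirePriority) := by
  rw [← PySem.Dict.contains_eq_isSome_get?, PySem.Dict.contains_eq_decide_mem_keys]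
  norm_num [show inhireRank.keys = inhirePriority by decide]

-- B's dedup-and-partition loop: the three list accumulators are the dedup of the input and its
-- two rank-membership filters
lemma loop_lemma (sc : List String) : ∀ (seen : PySem.Set String),
    sc.foldl
      (fun (st : PySem.Set String × List String × List String × List String) c =>
        if PySem.Set.contains st.1 c then st
        else (PySem.Set.add st.1 c, st.2.1 ++ [c],
              if (inhireRank.get? c).isSome then st.2.2.1 ++ [c] else st.2.2.1,
              if (inhireRank.get? c).isSome then st.2.2.2 else st.2.2.2 ++ [c]))
      (seen, seen, seen.filter (fun c => (inhireRank.get? c).isSome),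
       seen.filter (fun c => !(inhireRank.get? c).isSome))
    = (PySem.Set.update seen sc, PySem.Set.update seen sc,
       (PySem.Set.update seen sc).filter (fun c => (inhireRank.get? c).isSome),
       (PySem.Set.update seen sc).filter (fun c => !(inhireRank.get? c).isSome)) := by
  induction sc with
  | nil => intro seen; simp [PySem.Set.update]
  | cons c rest ih =>
    intro seen
    simp only [List.foldl_cons]
    by_cases h : PySem.Set.contains seen c = true
    · rw [if_pos h]
      have hm : c ∈ seen := by simpa [PySem.Set.contains] using h
      have ha : PySem.Set.add seen c = seen := by simp [PySem.Set.add, PySem.Set.contains, hm]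
      simpa [PySem.Set.update, ha] using ih seen
    · rw [if_neg h]
      have hm : c ∉ seen := by simpa [PySem.Set.contains] using h
      have ha : PySem.Set.add seen c = seen ++ [c] := by simp [PySem.Set.add, PySem.Set.contains, hm]
      have := ih (seen ++ [c])
      cases hg : inhireRank.get? c with
      | none => simpa [PySem.Set.update, ha, List.filter_append, hg] using this
      | some v => simpa [PySem.Set.update, ha, List.filter_append, hg] using this

-- sorting the selected priority companies by rank recovers the constant-list order A produces
lemma priority_sorted (sc : List String) :
    PySem.List.sorted ((PySem.List.dedup sc).filter (fun c => (inhireRank.get? c).isSome)) (fun c => inhireRank.getD c 0) false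
    = inhirePriority.filter (fun company => decide (company ∈ PySem.List.dedup sc)) := by
  apply PySem.List.sorted_eq_of_perm_of_pairwise_lt
  · rw [List.perm_ext_iff_of_nodup (List.Nodup.filter _ (by decide))
        (List.Nodup.filter _ (PySem.List.nodup_dedup sc))]
    intro a
    simp [rank_isSome, List.mem_filter, and_comm]
  · exact List.Pairwise.sublist (List.filter_sublist (l := inhirePriority)) (by decide)

-- on the deduped list, "not in priority" is exactly "not a key of rank"
lemma others_eq (sc : List String) :
    (PySem.List.dedup sc).filter
      (fun company => decide (company ∉ inhirePriority.filter (fun company => decide (company ∈ PySem.List.dedup sc))))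
    = (PySem.List.dedup sc).filter (fun c => !(inhireRank.get? c).isSome) :=
  List.filter_congr (fun x hx => by
    have hx' : x ∈ sc := by simpa [PySem.List.mem_dedup] using hx
    simp [rank_isSome, List.mem_filter, hx'])

-- ===== VERDICT (by name: the statement is the Claim_ definition above) =====
theorem split_inhire_batches_spec : Claim_equal_split_inhire_batches := by
  intro sc tm bs _
  unfold Spec_split_inhire_batches split_inhire_batches split_inhire_batches_alt
  by_cases h : sc = []
  · simp [h]
  · rw [if_neg h, if_neg h]
    have hst := loop_lemma sc []
    simp only [List.filter_nil] at hst
    simp only [show (PySem.Set.empty : PySem.Set String) = [] from rfl, hst,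
      show PySem.Set.update [] sc = PySem.List.dedup sc from rfl]
    simp only [priority_sorted sc, others_eq sc]
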